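-- pv_equiv track=rewrite | github.com/dreamlx/codeindex | src/codeindex/skill_helpers.py | generate_language_table_diff
-- ===== SOURCE A (Python) =====
-- def generate_language_table_diff(old_languages: list[str], new_languages: list[str]) -> str:
--     """
--     Generate diff for language support changes.
--
--     Args:
--         old_languages: Previously supported languages
--         new_languages: Currently supported languages
--
--     Returns:
--         Markdown-formatted diff showing new/removed languages
--     """
--     old_set = set(old_languages)
--     new_set = set(new_languages)
--
--     added = new_set - old_set
--     removed = old_set - new_set
--
--     if not added and not removed:
--         return "No change in language support."
--
--     lines = ["### Language Support Changes\n"]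
--
--     if added:
--         for lang in sorted(added):
--             lines.append(f"+ **{lang}** (newly supported)")
--
--     if removed:
--         for lang in sorted(removed):
--             lines.append(f"- **{lang}** (removed)")
--
--     return "\n".join(lines)
-- ===== SOURCE B (Python) =====
-- def generate_language_table_diff(old_languages: list[str], new_languages: list[str]) -> str:
--     olds = sorted(set(old_languages))
--     news = sorted(set(new_languages))
--     added, removed = [], []
--     i = j = 0
--     while i < len(olds) and j < len(news):
--         if olds[i] == news[j]:
--             i += 1
--             j += 1
--         elif olds[i] < news[j]:
--             removed.append(olds[i])
--             i += 1
--         else: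
--             added.append(news[j])
--             j += 1
--     removed.extend(olds[i:])
--     added.extend(news[j:])
--     if not added and not removed:
--         return "No change in language support."
--     lines = ["### Language Support Changes\n"]
--     lines += [f"+ **{lang}** (newly supported)" for lang in added]
--     lines += [f"- **{lang}** (removed)" for lang in removed]
--     return "\n".join(lines)
-- ===== Notes on version B (the rewrite author's own statement) =====
-- stated objective: alternative
-- what changed: Replaces A's two set differences followed by two independent sorts with sorting the deduplicated inputs once each and computing the added and removed lists in a single two-pointer merge, then the same formatting.
import Mathlib
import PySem

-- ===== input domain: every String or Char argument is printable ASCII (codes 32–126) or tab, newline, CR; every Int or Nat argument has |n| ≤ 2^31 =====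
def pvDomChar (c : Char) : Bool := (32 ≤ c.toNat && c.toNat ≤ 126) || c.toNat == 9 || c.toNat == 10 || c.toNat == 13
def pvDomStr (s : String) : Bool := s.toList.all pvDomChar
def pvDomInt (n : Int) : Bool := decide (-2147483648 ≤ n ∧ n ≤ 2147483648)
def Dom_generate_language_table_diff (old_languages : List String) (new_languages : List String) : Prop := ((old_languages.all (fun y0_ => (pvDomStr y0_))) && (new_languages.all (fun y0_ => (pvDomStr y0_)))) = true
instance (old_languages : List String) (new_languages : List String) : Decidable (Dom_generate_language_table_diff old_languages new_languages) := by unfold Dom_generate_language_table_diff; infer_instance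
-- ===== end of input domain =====

-- B replaces the two set differences + two sorts by sorting the deduplicated inputs once
-- and computing added/removed in a single two-pointer merge (objective: alternative).

-- ===== PORT A =====
def generate_language_table_diff (old_languages : List String) (new_languages : List String) : String :=
  let old_set := PySem.Set.ofList old_languages
  let new_set := PySem.Set.ofList new_languages
  let added := PySem.Set.diff new_set old_set
  let removed := PySem.Set.diff old_set new_set
  if added.isEmpty && removed.isEmpty then "No change in language support."
  else
    let lines : List String := ["### Language Support Changes\n"]
    let lines := if !added.isEmpty then
        (PySem.List.sorted added (fun x => x)).foldl
          (fun l lang => l ++ ["+ **" ++ lang ++ "** (newly supported)"]) lines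
      else lines
    let lines := if !removed.isEmpty then
        (PySem.List.sorted removed (fun x => x)).foldl
          (fun l lang => l ++ ["- **" ++ lang ++ "** (removed)"]) lines
      else lines
    PySem.Str.join "\n" lines

-- ===== PORT B =====
-- the two-pointer merge of Source B's while-loop: state = (remaining olds, remaining news)
def pvMerge : List String → List String → List String × List String
  | [], news => (news, [])
  | o :: os, [] => ([], o :: os)
  | o :: os, n :: ns =>
    if o = n then pvMerge os ns
    else if o < n then
      let p := pvMerge os (n :: ns)
      (p.1, o :: p.2)
    else
      let p := pvMerge (o :: os) ns
      (n :: p.1, p.2)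
termination_by xs ys => xs.length + ys.length
decreasing_by all_goals (simp only [List.length_cons]; omega)

def generate_language_table_diff_alt (old_languages : List String) (new_languages : List String) : String :=
  let olds := PySem.List.sorted (PySem.Set.ofList old_languages) (fun x => x)
  let news := PySem.List.sorted (PySem.Set.ofList new_languages) (fun x => x)
  let p := pvMerge olds news
  let added := p.1
  let removed := p.2
  if added.isEmpty && removed.isEmpty then "No change in language support."
  else
    let lines : List String := ["### Language Support Changes\n"]
      ++ added.map (fun lang => "+ **" ++ lang ++ "** (newly supported)")
      ++ removed.map (fun lang => "- **" ++ lang ++ "** (removed)")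
    PySem.Str.join "\n" lines

-- ===== PRECONDITION & SPEC =====
def Spec_generate_language_table_diff (old_languages : List String) (new_languages : List String) (out : String) : Prop := out = generate_language_table_diff_alt old_languages new_languages
instance (old_languages : List String) (new_languages : List String) (out : String) : Decidable (Spec_generate_language_table_diff old_languages new_languages out) := by unfold Spec_generate_language_table_diff; infer_instance

-- ===== CLAIM (what is proved, stated in full; the proofs are below) =====
def Claim_equal_generate_language_table_diff : Prop := ∀ (old_languages : List String) (new_languages : List String), Dom_generate_language_table_diff old_languages new_languages → Spec_generate_language_table_diff old_languages new_languages (generate_language_table_diff old_languages new_languages)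

-- ===== LEMMAS AND PROOFS =====

-- the merge of two strictly increasing lists is the pair of one-sided differences, in order
theorem pvMerge_eq (xs ys : List String)
    (hx : xs.Pairwise (· < ·)) (hy : ys.Pairwise (· < ·)) :
    pvMerge xs ys = (ys.filter (fun y => !xs.contains y), xs.filter (fun x => !ys.contains x)) := by
  fun_induction pvMerge xs ys with
  | case1 news => simp
  | case2 o os => simp
  | case3 os o ns ih =>
    rw [List.pairwise_cons] at hx hy
    rw [ih hx.2 hy.2]
    simp only [Prod.mk.injEq]
    constructor
    · rw [List.filter_cons_of_neg (by simp), List.filter_congr]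
      intro y hm
      simp [ne_of_gt (hy.1 y hm)]
    · rw [List.filter_cons_of_neg (by simp), List.filter_congr]
      intro x hm
      simp [ne_of_gt (hx.1 x hm)]
  | case4 o os n ns hne hlt p ih =>
    rw [List.pairwise_cons] at hx
    have hnotin : ∀ y ∈ n :: ns, o < y := by
      rw [List.pairwise_cons] at hy
      intro y hm
      rcases List.mem_cons.1 hm with h | h
      · exact h ▸ lt_of_le_of_ne (le_of_lt hlt) hne
      · exact lt_trans hlt (hy.1 y h)
    have hp := ih hx.2 hy
    simp only [p, hp, Prod.mk.injEq]
    constructor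
    · rw [List.filter_congr]
      intro y hm
      simp [ne_of_gt (hnotin y hm)]
    · rw [List.filter_cons_of_pos]
      simp only [List.contains_eq_any_beq, List.any_eq_false, Bool.not_eq_true']
      intro y hm
      simp [ne_of_lt (hnotin y hm)]
  | case5 o os n ns hne hnlt p ih =>
    have hlt : n < o := lt_of_le_of_ne (le_of_not_gt hnlt) (fun h => hne h.symm)
    rw [List.pairwise_cons] at hy
    have hnotin : ∀ x ∈ o :: os, n < x := by
      rw [List.pairwise_cons] at hx
      intro x hm
      rcases List.mem_cons.1 hm with h | h
      · exact h ▸ hlt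
      · exact lt_trans hlt (hx.1 x h)
    have hp := ih hx hy.2
    simp only [p, hp, Prod.mk.injEq]
    constructor
    · rw [List.filter_cons_of_pos]
      simp only [List.contains_eq_any_beq, List.any_eq_false, Bool.not_eq_true']
      intro x hm
      simp [ne_of_lt (hnotin x hm)]
    · rw [List.filter_congr]
      intro x hm
      simp [ne_of_gt (hnotin x hm)]

-- sorted(set(b) - set(a)) is sorted(set(b)) filtered by non-membership in sorted(set(a))
theorem sorted_diff_eq (a b : List String) :
    PySem.List.sorted (PySem.Set.diff (PySem.Set.ofList b) (PySem.Set.ofList a)) (fun x => x)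
      = (PySem.List.sorted (PySem.Set.ofList b) (fun x => x)).filter
          (fun y => !(PySem.List.sorted (PySem.Set.ofList a) (fun x => x)).contains y) := by
  apply PySem.List.sorted_eq_of_perm_of_pairwise_lt
  · refine ((PySem.List.sorted_perm (PySem.Set.ofList b) (fun x => x) false).filter _).trans ?_
    rw [PySem.Set.diff, List.filter_congr]
    intro y _
    simp only [Bool.not_inj_iff]
    rw [Bool.eq_iff_iff]
    simp [(PySem.List.sorted_perm (PySem.Set.ofList a) (fun x => x) false).mem_iff]
  · exact (PySem.List.sorted_ofList_pairwise_lt b).filter _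

-- flattening singleton blocks is a map (shape simp leaves A's line loop in)
theorem flat_single (l : List String) (f : String → String) :
    (l.map (fun x => [f x])).flatten = l.map f := by
  induction l with
  | nil => rfl
  | cons a t ih => simp [ih]

-- sorting does not change emptiness
theorem sorted_isEmpty (l : List String) :
    (PySem.List.sorted l (fun x => x)).isEmpty = l.isEmpty := by
  rw [Bool.eq_iff_iff, List.isEmpty_iff, List.isEmpty_iff]
  constructor
  · intro h; exact (h ▸ (PySem.List.sorted_perm l (fun x => x) false)).symm.eq_nil
  · intro h; exact ((PySem.List.sorted_perm l (fun x => x) false).trans (h ▸ List.Perm.refl l)).eq_nil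

-- ===== VERDICT (by name: the statement is the Claim_ definition above) =====
theorem generate_language_table_diff_spec : Claim_equal_generate_language_table_diff := by
  intro old_languages new_languages _
  unfold Spec_generate_language_table_diff generate_language_table_diff generate_language_table_diff_alt
  simp only []
  rw [pvMerge_eq _ _ (PySem.List.sorted_ofList_pairwise_lt old_languages)
        (PySem.List.sorted_ofList_pairwise_lt new_languages)]
  rw [← sorted_diff_eq old_languages new_languages, ← sorted_diff_eq new_languages old_languages]
  rw [sorted_isEmpty, sorted_isEmpty]
  by_cases ha : (PySem.Set.diff (PySem.Set.ofList new_languages) (PySem.Set.ofList old_languages)).isEmpty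
  <;> by_cases hr : (PySem.Set.diff (PySem.Set.ofList old_languages) (PySem.Set.ofList new_languages)).isEmpty
  · simp [ha, hr]
  · simp [hr, flat_single, List.isEmpty_iff.mp ha, PySem.List.sorted]
  · simp [ha, flat_single, List.isEmpty_iff.mp hr, PySem.List.sorted]
  · simp [ha, hr, flat_single]
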